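-- pv_equiv track=rewrite | github.com/FeMa42/review_gpt | utils/pdf_cleaner.py | add_linebreaks
-- ===== SOURCE A (Python) =====
-- def add_linebreaks(text):
--     # Split the text into words
--     words = text.split()
--     # Insert line break every 20 words
--     output_text = ""
--     for i, word in enumerate(words):
--         output_text += word + " "
--         if (i + 1) % 20 == 0:
--             output_text += "\n"
--     return output_text.strip()
-- ===== SOURCE B (Python) =====
-- def add_linebreaks(text):
--     words = text.split()
--     lines = [" ".join(words[i:i + 20]) for i in range(0, len(words), 20)]
--     return " \n".join(lines)
-- ===== Notes on version B (the rewrite author's own statement) =====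
-- stated objective: simpler
-- what changed: A's per-word counter-and-modulo accumulation with a trailing strip() is replaced by splitting once, chunking the word list into groups of 20 by slicing, and joining the groups with ' ' (no modulo branch, no strip needed).
import Mathlib
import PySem

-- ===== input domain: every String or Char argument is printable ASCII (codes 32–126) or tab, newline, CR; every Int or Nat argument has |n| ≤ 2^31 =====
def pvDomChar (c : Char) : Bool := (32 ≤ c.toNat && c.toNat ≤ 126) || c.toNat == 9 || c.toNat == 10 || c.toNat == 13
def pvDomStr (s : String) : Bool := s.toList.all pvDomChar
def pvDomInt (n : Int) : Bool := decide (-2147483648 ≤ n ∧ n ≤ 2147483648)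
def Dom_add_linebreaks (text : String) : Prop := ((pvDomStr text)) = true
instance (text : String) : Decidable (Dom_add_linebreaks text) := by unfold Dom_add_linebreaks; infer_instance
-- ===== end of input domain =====

-- B replaces A's per-word counter/modulo accumulation + strip() by chunking the word
-- list into groups of 20 and joining the groups with " \n" (objective: simpler).

-- ===== PORT A =====
-- A's loop step: output_text += word + " "; if (i+1) % 20 == 0: output_text += "\n"
def pvStepA (acc : List Char) (p : Int × List Char) : List Char :=
  acc ++ p.2 ++ [' '] ++ (if PySem.Int.mod (p.1 + 1) 20 = 0 then ['\n'] else [])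

def add_linebreaks (text : String) : String :=
  let words := PySem.Chars.split₀ text.toList
  let output_text := (PySem.List.enumerate words 0).foldl pvStepA []
  String.ofList (PySem.Chars.strip output_text)

-- ===== PORT B =====
def add_linebreaks_alt (text : String) : String :=
  let words := PySem.Chars.split₀ text.toList
  let lines := (PySem.List.pyRange 0 (words.length : Int) 20).map
    (fun i => PySem.Chars.join [' '] (PySem.List.slice words (some i) (some (i + 20))))
  String.ofList (PySem.Chars.join [' ', '\n'] lines)

-- ===== PRECONDITION & SPEC =====
def Spec_add_linebreaks (text : String) (out : String) : Prop := out = add_linebreaks_alt text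
instance (text : String) (out : String) : Decidable (Spec_add_linebreaks text out) := by unfold Spec_add_linebreaks; infer_instance

-- ===== CLAIM (what is proved, stated in full; the proofs are below) =====
def Claim_equal_add_linebreaks : Prop := ∀ (text : String), Dom_add_linebreaks text → Spec_add_linebreaks text (add_linebreaks text)

-- ===== LEMMAS AND PROOFS =====

-- a word produced by split(): nonempty, no whitespace characters
def pvGood (w : List Char) : Prop := w ≠ [] ∧ ∀ c ∈ w, PySem.Chars.isspace c = false

lemma pvSplit_go_good (s cur acc) (hcur : ∀ c ∈ cur, PySem.Chars.isspace c = false)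
    (hacc : ∀ w ∈ acc, pvGood w) : ∀ w ∈ PySem.Chars.split₀.go s cur acc, pvGood w := by
  induction s generalizing cur acc with
  | nil =>
      intro w hw
      rw [PySem.Chars.split₀.go] at hw
      by_cases hce : cur.isEmpty
      · rw [if_pos hce] at hw; exact hacc w (List.mem_reverse.mp hw)
      · rw [if_neg hce] at hw
        rcases List.mem_cons.mp (List.mem_reverse.mp hw) with h | h
        · subst h
          have hcne : cur ≠ [] := by simpa using hce
          refine ⟨by simpa using hcne, ?_⟩
          intro c hc; exact hcur c (List.mem_reverse.mp hc)
        · exact hacc w h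
  | cons c rest ih =>
      intro w hw
      rw [PySem.Chars.split₀.go] at hw
      by_cases hsp : PySem.Chars.isspace c
      · rw [if_pos hsp] at hw
        by_cases hce : cur.isEmpty
        · rw [if_pos hce] at hw
          exact ih [] acc (by simp) hacc w hw
        · rw [if_neg hce] at hw
          refine ih [] (cur.reverse :: acc) (by simp) ?_ w hw
          intro v hv
          rcases List.mem_cons.mp hv with h | h
          · subst h
            have hcne : cur ≠ [] := by simpa using hce
            refine ⟨by simpa using hcne, ?_⟩
            intro d hd; exact hcur d (List.mem_reverse.mp hd)
          · exact hacc v h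
      · rw [if_neg hsp] at hw
        refine ih (c :: cur) acc ?_ hacc w hw
        intro d hd
        rcases List.mem_cons.mp hd with h | h
        · subst h; simpa using hsp
        · exact hcur d h

lemma pvSplit_good (s : List Char) : ∀ w ∈ PySem.Chars.split₀ s, pvGood w := by
  simpa [PySem.Chars.split₀] using pvSplit_go_good s [] [] (by simp) (by simp)

-- chunks of 20
def pvChunk (ws : List (List Char)) : List (List (List Char)) :=
  if h : ws = [] then [] else ws.take 20 :: pvChunk (ws.drop 20)
  termination_by ws.length
  decreasing_by cases ws with
    | nil => exact absurd rfl h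
    | cons a t => simp [List.length_drop]

def pvFlat (c : List (List Char)) : List Char := (c.map (· ++ [' '])).flatten

-- A's pre-strip output, chunk by chunk
def pvBody (ws : List (List Char)) : List Char :=
  if h : ws = [] then [] else
    pvFlat (ws.take 20) ++ (if (ws.take 20).length = 20 then ['\n'] else []) ++ pvBody (ws.drop 20)
  termination_by ws.length
  decreasing_by cases ws with
    | nil => exact absurd rfl h
    | cons a t => simp [List.length_drop]

lemma pvChunk_nil : pvChunk [] = [] := by unfold pvChunk; rfl

lemma pvChunk_cons (ws : List (List Char)) (h : ws ≠ []) :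
    pvChunk ws = ws.take 20 :: pvChunk (ws.drop 20) := by
  conv_lhs => unfold pvChunk
  rw [dif_neg h]

lemma pvBody_nil : pvBody [] = [] := by unfold pvBody; rfl

lemma pvBody_cons (ws : List (List Char)) (h : ws ≠ []) :
    pvBody ws = pvFlat (ws.take 20) ++ (if (ws.take 20).length = 20 then ['\n'] else [])
      ++ pvBody (ws.drop 20) := by
  conv_lhs => unfold pvBody
  rw [dif_neg h]

lemma pvFoldChunk (c : List (List Char)) (q : Nat) :
    ∀ (p : Nat) (acc : List Char), p < 20 → p + c.length ≤ 20 →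
    (PySem.List.enumerate c ((20 * q + p : Nat) : Int)).foldl pvStepA acc
      = acc ++ pvFlat c ++ (if p + c.length = 20 then ['\n'] else []) := by
  induction c with
  | nil =>
      intro p acc hp _
      have h20 : p ≠ 20 := by omega
      simp [PySem.List.enumerate_nil, pvFlat, h20]
  | cons w rest ih =>
      intro p acc hp hlen
      rw [PySem.List.enumerate_cons, List.foldl_cons]
      have hmod : PySem.Int.mod (((20 * q + p : Nat) : Int) + 1) 20
          = (((20 * q + p + 1) % 20 : Nat) : Int) := by
        have hc : (((20 * q + p : Nat) : Int) + 1) = ((20 * q + p + 1 : Nat) : Int) := by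
          push_cast; ring
        rw [hc]
        exact_mod_cast PySem.Int.mod_natCast (20 * q + p + 1) 20
      by_cases h19 : p = 19
      · subst h19
        have hrest : rest = [] := by
          cases rest with
          | nil => rfl
          | cons a b => exfalso; simp at hlen; omega
        subst hrest
        have hz : PySem.Int.mod (((20 * q + 19 : Nat) : Int) + 1) 20 = 0 := by
          rw [hmod]
          have hm0 : (20 * q + 19 + 1) % 20 = 0 := by omega
          rw [hm0]; simp
        simp only [pvStepA]
        rw [if_pos hz]
        simp [PySem.List.enumerate_nil, pvFlat]
      · have hmodne : ¬ PySem.Int.mod (((20 * q + p : Nat) : Int) + 1) 20 = 0 := by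
          rw [hmod]
          intro hcon
          have h0 : (20 * q + p + 1) % 20 = 0 := by exact_mod_cast hcon
          omega
        have hstep : pvStepA acc ((20 * q + p : Nat), w) = acc ++ w ++ [' '] := by
          simp only [pvStepA]
          rw [if_neg hmodne]
          simp
        rw [hstep]
        have hcast : ((20 * q + p : Nat) : Int) + 1 = ((20 * q + (p + 1) : Nat) : Int) := by
          push_cast; ring
        rw [hcast, ih (p + 1) (acc ++ w ++ [' ']) (by omega) (by simp at hlen ⊢; omega)]
        have hcond : p + 1 + rest.length = p + (w :: rest).length := by simp; omega
        simp only [pvFlat, List.map_cons, List.flatten_cons, hcond, List.append_assoc]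

lemma pvFoldAll (ws : List (List Char)) : ∀ (q : Nat) (acc : List Char),
    (PySem.List.enumerate ws ((20 * q : Nat) : Int)).foldl pvStepA acc = acc ++ pvBody ws := by
  induction hn : ws.length using Nat.strong_induction_on generalizing ws with
  | _ n ihn =>
  intro q acc
  by_cases h : ws = []
  · subst h; simp [PySem.List.enumerate_nil, pvBody]
  · have hsplit : ws = ws.take 20 ++ ws.drop 20 := (List.take_append_drop 20 ws).symm
    rw [pvBody_cons ws h]
    conv_lhs => rw [hsplit]
    rw [PySem.List.enumerate_append, List.foldl_append]
    have htk : (ws.take 20).length ≤ 20 := by simp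
    have h0 : (0 : Nat) + (ws.take 20).length ≤ 20 := by omega
    have hfc := pvFoldChunk (ws.take 20) q 0 acc (by omega) h0
    simp only [Nat.zero_add] at hfc
    have hstart : ((20 * q : Nat) : Int) = ((20 * q + 0 : Nat) : Int) := by norm_num
    rw [hstart, hfc]
    by_cases hbig : 20 ≤ ws.length
    · have hlen20 : (ws.take 20).length = 20 := by simp [hbig]
      have hcast : ((20 * q + 0 : Nat) : Int) + ((ws.take 20).length : Int)
          = ((20 * (q + 1) : Nat) : Int) := by rw [hlen20]; push_cast; ring
      have hpos : 0 < ws.length := List.length_pos_iff.mpr h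
      rw [hcast, ihn (ws.drop 20).length (by simp [List.length_drop]; omega) (ws.drop 20) rfl (q + 1)]
      simp [hlen20]
    · have hdrop : ws.drop 20 = [] := by
        apply List.drop_eq_nil_of_le; omega
      have hlt : (ws.take 20).length ≠ 20 := by
        simp [List.length_take]; omega
      rw [hdrop]
      simp [PySem.List.enumerate_nil, pvBody]

-- chunking as a range map
lemma pvChunk_eq_range (ws : List (List Char)) :
    pvChunk ws = (List.range ((ws.length + 19) / 20)).map (fun k => (ws.drop (20 * k)).take 20) := by
  induction hn : ws.length using Nat.strong_induction_on generalizing ws with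
  | _ n ihn =>
  subst hn
  by_cases h : ws = []
  · subst h; simp [pvChunk_nil]
  · have hpos : 0 < ws.length := List.length_pos_iff.mpr h
    have hcnt : (ws.length + 19) / 20 = ((ws.drop 20).length + 19) / 20 + 1 := by
      simp [List.length_drop]; omega
    rw [pvChunk_cons ws h, hcnt, List.range_succ_eq_map, List.map_cons, List.map_map]
    simp only [Nat.mul_zero, List.drop_zero]
    congr 1
    rw [ihn (ws.drop 20).length (by simp [List.length_drop]; omega) (ws.drop 20) rfl]
    apply List.map_congr_left
    intro k _
    simp [List.drop_drop]
    congr 2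
    omega

-- B's lines are the chunks, joined
lemma pvLines_eq (ws : List (List Char)) :
    (PySem.List.pyRange 0 (ws.length : Int) 20).map
      (fun i => PySem.Chars.join [' '] (PySem.List.slice ws (some i) (some (i + 20))))
    = (pvChunk ws).map (PySem.Chars.join [' ']) := by
  have hrange : PySem.List.pyRange 0 (ws.length : Int) 20
      = (List.range ((ws.length + 19) / 20)).map (fun k => ((20 * k : Nat) : Int)) := by
    rw [PySem.List.pyRange_of_pos 0 (ws.length : Int) (by norm_num)]
    have hcnt : (if (0 : Int) < (ws.length : Int)
        then (((ws.length : Int) - 0 + 20 - 1) / 20).toNat else 0) = (ws.length + 19) / 20 := by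
      by_cases hp : 0 < ws.length
      · rw [if_pos (by exact_mod_cast hp)]
        have h1 : ((ws.length : Int) - 0 + 20 - 1) = ((ws.length + 19 : Nat) : Int) := by
          push_cast; ring
        rw [h1]
        omega
      · have h0 : ws.length = 0 := by omega
        simp [h0]
    rw [hcnt]
    apply List.map_congr_left
    intro k _
    push_cast; ring
  rw [hrange, List.map_map, pvChunk_eq_range, List.map_map]
  apply List.map_congr_left
  intro k _
  simp only [Function.comp_apply]
  congr 1
  have h2 : ((20 * k : Nat) : Int) + 20 = ((20 * k : Nat) : Int) + ((20 : Nat) : Int) := by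
    norm_num
  rw [h2, PySem.List.slice_natCast_add]

lemma pvAlt_eq (text : String) :
    add_linebreaks_alt text
      = String.ofList (PySem.Chars.join [' ', '\n']
          ((pvChunk (PySem.Chars.split₀ text.toList)).map (PySem.Chars.join [' ']))) := by
  unfold add_linebreaks_alt
  dsimp only
  rw [pvLines_eq]

-- flatten of word+" " is join " " plus trailing space
lemma pvFlat_eq_join (c : List (List Char)) (hc : c ≠ []) :
    pvFlat c = PySem.Chars.join [' '] c ++ [' '] := by
  induction c with
  | nil => exact absurd rfl hc
  | cons w rest ih =>
      cases rest with
      | nil => simp [pvFlat, PySem.Chars.join_singleton]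
      | cons v t =>
          rw [PySem.Chars.join_cons_cons]
          have := ih (by simp)
          simp [pvFlat] at this ⊢
          rw [this]

-- ends of a string: nonempty, non-space first and last characters
def pvNS (l : List Char) : Prop :=
  (l.head?.any fun c => !PySem.Chars.isspace c) = true ∧
  (l.getLast?.any fun c => !PySem.Chars.isspace c) = true

lemma pvNS_ne_nil {l : List Char} (h : pvNS l) : l ≠ [] := by
  intro he; subst he; simp [pvNS] at h

lemma pvNS_append (x y : List Char) (sep : List Char) (hx : pvNS x) (hy : pvNS y) :
    pvNS (x ++ sep ++ y) := by
  constructor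
  · rw [List.append_assoc, List.head?_append]
    cases hhx : x.head? with
    | none => exact absurd (List.head?_eq_none_iff.mp hhx) (pvNS_ne_nil hx)
    | some c => have := hx.1; rw [hhx] at this; simpa using this
  · rw [List.getLast?_append]
    cases hhy : y.getLast? with
    | none => exact absurd (List.getLast?_eq_none_iff.mp hhy) (pvNS_ne_nil hy)
    | some c => have := hy.2; rw [hhy] at this; simpa [hhy] using this

lemma pvNS_good {w : List Char} (h : pvGood w) : pvNS w := by
  obtain ⟨hne, hall⟩ := h
  constructor
  · cases w with
    | nil => exact absurd rfl hne
    | cons a t => simpa using hall a (by simp)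
  · cases hlast : w.getLast? with
    | none => exact absurd (List.getLast?_eq_none_iff.mp hlast) hne
    | some c =>
        simpa using hall c (List.mem_of_getLast? hlast)

lemma pvNS_J (c : List (List Char)) (hc : c ≠ []) (hgood : ∀ w ∈ c, pvGood w) :
    pvNS (PySem.Chars.join [' '] c) := by
  induction c with
  | nil => exact absurd rfl hc
  | cons w rest ih =>
      cases rest with
      | nil => rw [PySem.Chars.join_singleton]; exact pvNS_good (hgood w (by simp))
      | cons v t =>
          rw [PySem.Chars.join_cons_cons]
          exact pvNS_append _ _ _ (pvNS_good (hgood w (by simp)))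
            (ih (by simp) (fun u hu => hgood u (List.mem_cons_of_mem w hu)))

lemma pvNS_C (ws : List (List Char)) (hne : ws ≠ []) (hgood : ∀ w ∈ ws, pvGood w) :
    pvNS (PySem.Chars.join [' ', '\n'] ((pvChunk ws).map (PySem.Chars.join [' ']))) := by
  induction hn : ws.length using Nat.strong_induction_on generalizing ws with
  | _ n ihn =>
  subst hn
  rw [pvChunk_cons ws hne]
  have hJ : pvNS (PySem.Chars.join [' '] (ws.take 20)) := by
    apply pvNS_J
    · cases ws with
      | nil => exact absurd rfl hne
      | cons a t => simp
    · intro w hw; exact hgood w (List.mem_of_mem_take hw)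
  by_cases hd : ws.drop 20 = []
  · rw [hd, pvChunk_nil]
    simp only [List.map_cons, List.map_nil, PySem.Chars.join_singleton]
    exact hJ
  · have hpos : 0 < ws.length := List.length_pos_iff.mpr hne
    have hrec := ihn (ws.drop 20).length
      (by simp [List.length_drop]; omega)
      (ws.drop 20) hd (fun w hw => hgood w (List.mem_of_mem_drop hw)) rfl
    cases hck : pvChunk (ws.drop 20) with
    | nil => rw [pvChunk_cons _ hd] at hck; simp at hck
    | cons c t =>
        rw [List.map_cons, List.map_cons, PySem.Chars.join_cons_cons]
        rw [hck, List.map_cons] at hrec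
        exact pvNS_append _ _ _ hJ hrec

-- A's pre-strip output is B's joined string plus a trailing " " or " \n"
lemma pvBody_eq (ws : List (List Char)) (hne : ws ≠ []) :
    pvBody ws = PySem.Chars.join [' ', '\n'] ((pvChunk ws).map (PySem.Chars.join [' '])) ++ [' ']
    ∨ pvBody ws = PySem.Chars.join [' ', '\n'] ((pvChunk ws).map (PySem.Chars.join [' '])) ++ [' ', '\n'] := by
  induction hn : ws.length using Nat.strong_induction_on generalizing ws with
  | _ n ihn =>
  subst hn
  rw [pvBody_cons ws hne, pvChunk_cons ws hne]
  have htkne : ws.take 20 ≠ [] := by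
    cases ws with
    | nil => exact absurd rfl hne
    | cons a t => simp
  rw [pvFlat_eq_join _ htkne]
  by_cases hd : ws.drop 20 = []
  · rw [hd]
    rw [pvBody_nil, pvChunk_nil]
    simp only [List.map_nil, List.map_cons, PySem.Chars.join_singleton, List.append_nil]
    by_cases h20 : (ws.take 20).length = 20
    · right; rw [if_pos h20]; simp
    · left; rw [if_neg h20]; simp
  · have hpos : 0 < ws.length := List.length_pos_iff.mpr hne
    have hrec := ihn (ws.drop 20).length
      (by simp [List.length_drop]; omega)
      (ws.drop 20) hd rfl
    have h20 : (ws.take 20).length = 20 := by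
      have : 20 < ws.length ∨ ws.length ≤ 20 := by omega
      rcases this with h | h
      · simp; omega
      · exact absurd (List.drop_eq_nil_of_le h) hd
    rw [if_pos h20]
    cases hck : pvChunk (ws.drop 20) with
    | nil => rw [pvChunk_cons _ hd] at hck; simp at hck
    | cons c t =>
        rw [hck] at hrec
        rcases hrec with h | h
        · left
          rw [h]
          simp [PySem.Chars.join_cons_cons]
        · right
          rw [h]
          simp [PySem.Chars.join_cons_cons]
    
-- strip removes exactly the trailing " " or " \n"
lemma pvStrip_append (l t : List Char) (hl : pvNS l) (ht : t = [' '] ∨ t = [' ', '\n']) :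
    PySem.Chars.strip (l ++ t) = l := by
  unfold PySem.Chars.strip PySem.Chars.lstrip PySem.Chars.rstrip
  have hlstrip : List.dropWhile PySem.Chars.isspace (l ++ t) = l ++ t := by
    cases l with
    | nil => exact absurd rfl (pvNS_ne_nil hl)
    | cons a rest =>
        have ha : PySem.Chars.isspace a = false := by
          have := hl.1; simpa using this
        simp [ha]
  rw [hlstrip, List.reverse_append]
  have htall : ∀ c ∈ t.reverse, PySem.Chars.isspace c = true := by
    intro c hc
    have hcs : c = ' ' ∨ c = '\n' := by
      rcases ht with h | h <;> subst h <;> simp at hc <;> tauto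
    rcases hcs with h | h <;> subst h <;> decide
  rw [List.dropWhile_append]
  have hdt : List.dropWhile PySem.Chars.isspace t.reverse = [] := by
    apply List.dropWhile_eq_nil_iff.mpr
    intro x hx; exact htall x hx
  rw [hdt]
  simp only [List.isEmpty_nil, if_true]
  have hdl : List.dropWhile PySem.Chars.isspace l.reverse = l.reverse := by
    cases hrev : l.reverse with
    | nil => simp
    | cons b rest =>
        have hb : l.getLast? = some b := by
          rw [← List.head?_reverse, hrev]; simp
        have hbs : PySem.Chars.isspace b = false := by
          have := hl.2; rw [hb] at this; simpa using this
        simp [hbs]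
  rw [hdl, List.reverse_reverse]

-- ===== VERDICT (by name: the statement is the Claim_ definition above) =====
theorem add_linebreaks_spec : Claim_equal_add_linebreaks := by
  intro text _
  unfold Spec_add_linebreaks
  rw [pvAlt_eq]
  unfold add_linebreaks
  dsimp only
  have hgood : ∀ w ∈ PySem.Chars.split₀ text.toList, pvGood w := pvSplit_good text.toList
  generalize PySem.Chars.split₀ text.toList = ws at hgood ⊢
  have hfold : (PySem.List.enumerate ws 0).foldl pvStepA [] = pvBody ws := by
    simpa using pvFoldAll ws 0 []
  rw [hfold]
  by_cases h : ws = []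
  · subst h
    simp [pvBody_nil, pvChunk_nil, PySem.Chars.join_nil, PySem.Chars.strip,
      PySem.Chars.lstrip, PySem.Chars.rstrip]
  · rcases pvBody_eq ws h with hb | hb <;>
      rw [hb, pvStrip_append _ _ (pvNS_C ws h hgood) (by tauto)]
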